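-- pv_equiv track=rewrite | github.com/Ignitor21/Steiner-alogrithm | steiner.py | i1s_basic
-- ===== SOURCE A (Python) =====
-- def rmst_length(points):
--     n = len(points)
--     if n <= 1:
--         return 0
--
--     INF = float("inf")
--     in_tree = [False] * n
--     best_dist = [INF] * n
--     best_dist[0] = 0
--     total = 0
--
--     for _ in range(n):
--         u = -1
--         ud = INF
--         for v in range(n):
--             if not in_tree[v] and best_dist[v] < ud:
--                 ud = best_dist[v]
--                 u = v
--         if u == -1:
--             break
--         in_tree[u] = True
--         total += ud
--         px, py = points[u]
--         for v in range(n):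
--             if not in_tree[v]:
--                 d = abs(points[v][0] - px) + abs(points[v][1] - py)
--                 if d < best_dist[v]:
--                     best_dist[v] = d
--
--     return total
--
-- def hanan_grid(points):
--     xs = sorted({p[0] for p in points})
--     ys = sorted({p[1] for p in points})
--     existing = set(points)
--     candidates = []
--     for x in xs:
--         for y in ys:
--             if (x, y) not in existing:
--                 candidates.append((x, y))
--     return candidates
--
-- def i1s_basic(terminals):
--     points = list(terminals)
--     current_len = rmst_length(points)
--
--     while True:
--         candidates = hanan_grid(points)
--         if not candidates:
--             break
--
--         best_gain = 0
--         best_c = None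
--         for c in candidates:
--             new_len = rmst_length(points + [c])
--             gain = current_len - new_len
--             if gain > best_gain:
--                 best_gain = gain
--                 best_c = c
--
--         if best_c is None:
--             break
--
--         points.append(best_c)
--         current_len -= best_gain
--
--     return points
-- ===== SOURCE B (Python) =====
-- def _rmst(pts):
--     # Prim over a shrinking worklist of (point, best-distance-to-tree) pairs:
--     # take the first minimum out of the list, then fold the new point in.
--     if len(pts) <= 1:
--         return 0
--     cx, cy = pts[0]
--     rem = [(p, abs(p[0] - cx) + abs(p[1] - cy)) for p in pts[1:]]
--     total = 0
--     while rem: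
--         best = min(rem, key=lambda t: t[1])
--         rem.remove(best)
--         (cx, cy), d = best
--         total += d
--         rem = [(p, dp if dp <= (nd := abs(p[0] - cx) + abs(p[1] - cy)) else nd) for p, dp in rem]
--     return total
--
-- def _hanan(pts):
--     seen = set(pts)
--     return [(x, y)
--             for x in sorted({p[0] for p in pts})
--             for y in sorted({p[1] for p in pts})
--             if (x, y) not in seen]
--
-- def i1s_basic(terminals):
--     points = list(terminals)
--     cur = _rmst(points)
--     while True:
--         cands = _hanan(points)
--         if not cands:
--             return points
--         scored = [(_rmst(points + [c]), c) for c in cands]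
--         m, c = min(scored, key=lambda t: t[0])
--         if m >= cur:
--             return points
--         points.append(c)
--         cur = m
-- ===== Notes on version B (the rewrite author's own statement) =====
-- stated objective: alternative
-- what changed: Prim's boolean-array/best-dist-array state with two full index scans per step is replaced by a shrinking worklist of (point, best-distance) pairs (extract the first minimum, fold the new point in), and the best-Steiner-candidate search by building a scored list and taking its first minimum instead of a running best-gain accumulator.
import Mathlib
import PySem

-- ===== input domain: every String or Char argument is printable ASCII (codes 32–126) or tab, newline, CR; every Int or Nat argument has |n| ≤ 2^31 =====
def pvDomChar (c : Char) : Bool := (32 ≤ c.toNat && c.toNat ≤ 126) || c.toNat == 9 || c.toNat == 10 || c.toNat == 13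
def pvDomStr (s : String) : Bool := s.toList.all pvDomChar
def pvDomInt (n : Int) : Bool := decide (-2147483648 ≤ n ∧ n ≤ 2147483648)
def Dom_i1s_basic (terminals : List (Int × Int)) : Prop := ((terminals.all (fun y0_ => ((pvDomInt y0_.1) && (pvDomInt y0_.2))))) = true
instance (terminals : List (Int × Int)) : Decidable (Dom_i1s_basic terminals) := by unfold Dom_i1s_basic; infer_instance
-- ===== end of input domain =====

-- B replaces Prim's boolean/best-dist arrays by a shrinking worklist of (point, distance) pairs
-- and the best-candidate fold by min over a scored list (alternative structure, same complexity).


-- ===== PORT A =====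
-- float('inf') sentinel: best_dist entries are `Option Int`, `none` = INF; pvLtO is Python's `<`
-- on {int, inf} (exact: inf < inf is False, int < inf is True, inf < int is False).
def pvLtO : Option Int → Option Int → Bool
  | none, _ => false
  | some _, none => true
  | some a, some b => decide (a < b)

-- the `for v in range(n)` scan picking u (= none for -1) and ud
def pvScanA (intree : List Bool) (bd : List (Option Int)) (n : Nat) : Option Nat × Option Int :=
  (List.range n).foldl
    (fun st v =>
      if (!(intree.getD v true)) && pvLtO (bd.getD v none) st.2 then (some v, bd.getD v none) else st)
    (none, none)

-- the relaxation loop (Python mutates bd index by index; each index independently, so a map over range n)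
def pvRelaxA (pts : List (Int × Int)) (n : Nat) (intree : List Bool) (bd : List (Option Int)) (u : Nat) :
    List (Option Int) :=
  (List.range n).map (fun v =>
    if intree.getD v true then bd.getD v none
    else
      let d : Int := |(pts.getD v (0,0)).1 - (pts.getD u (0,0)).1| +
                     |(pts.getD v (0,0)).2 - (pts.getD u (0,0)).2|
      if pvLtO (some d) (bd.getD v none) then some d else bd.getD v none)

-- `for _ in range(n)` with early `break` on u == -1 (all indices in range; getD defaults unreachable)
def pvPrimLoopA (pts : List (Int × Int)) (n : Nat) :
    Nat → List Bool → List (Option Int) → Int → Int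
  | 0, _, _, total => total
  | k+1, intree, bd, total =>
    match pvScanA intree bd n with
    | (none, _) => total
    | (some u, ud) =>
      let intree' := intree.set u true
      pvPrimLoopA pts n k intree' (pvRelaxA pts n intree' bd u) (total + ud.getD 0)

def pvRmstA (pts : List (Int × Int)) : Int :=
  if pts.length ≤ 1 then 0
  else pvPrimLoopA pts pts.length pts.length (List.replicate pts.length false)
        (some 0 :: List.replicate (pts.length - 1) none) 0

def pvHananA (pts : List (Int × Int)) : List (Int × Int) :=
  let xs := PySem.List.sorted (PySem.Set.ofList (pts.map Prod.fst)) (fun x => x) false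
  let ys := PySem.List.sorted (PySem.Set.ofList (pts.map Prod.snd)) (fun x => x) false
  xs.foldl (fun acc x =>
    ys.foldl (fun acc2 y => if (x, y) ∈ pts then acc2 else acc2 ++ [(x, y)]) acc) []

-- `while True` loop; fuel current_len+1 suffices: every accepted step lowers current_len
-- (a nonnegative sum of distances) by at least 1
def pvOuterA (fuel : Nat) (pts : List (Int × Int)) (curLen : Int) : List (Int × Int) :=
  match fuel with
  | 0 => pts
  | fuel+1 =>
    let cands := pvHananA pts
    if cands.isEmpty then pts
    else
      let best := cands.foldl (fun st c =>
        let gain := curLen - pvRmstA (pts ++ [c])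
        if st.1 < gain then (gain, some c) else st) ((0 : Int), (none : Option (Int × Int)))
      match best with
      | (_, none) => pts
      | (bg, some c) => pvOuterA fuel (pts ++ [c]) (curLen - bg)

def i1s_basic (terminals : List (Int × Int)) : List (Int × Int) :=
  pvOuterA ((pvRmstA terminals).toNat + 1) terminals (pvRmstA terminals)

-- ===== PORT B =====
def pvMan (p q : Int × Int) : Int := |p.1 - q.1| + |p.2 - q.2|

-- `while rem:` — fuel = initial length of rem (one pair leaves the list per iteration)
def pvAltLoop (fuel : Nat) (rem : List ((Int × Int) × Int)) (total : Int) : Int :=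
  match fuel with
  | 0 => total
  | fuel+1 =>
    if rem.isEmpty then total
    else
      match PySem.List.min? rem (fun t => t.2) with
      | none => total
      | some best =>
        let rem1 := (PySem.List.remove? rem best).getD []
        pvAltLoop fuel (rem1.map (fun t => (t.1, min t.2 (pvMan t.1 best.1)))) (total + best.2)

def pvRmstAlt (pts : List (Int × Int)) : Int :=
  if pts.length ≤ 1 then 0
  else pvAltLoop pts.tail.length (pts.tail.map (fun p => (p, pvMan p (pts.headD (0,0))))) 0

def pvHananAlt (pts : List (Int × Int)) : List (Int × Int) :=
  let xs := PySem.List.sorted (PySem.Set.ofList (pts.map Prod.fst)) (fun x => x) false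
  let ys := PySem.List.sorted (PySem.Set.ofList (pts.map Prod.snd)) (fun x => x) false
  xs.flatMap (fun x => (ys.filter (fun y => !(decide ((x, y) ∈ pts)))).map (fun y => (x, y)))

def pvOuterAlt (fuel : Nat) (pts : List (Int × Int)) (cur : Int) : List (Int × Int) :=
  match fuel with
  | 0 => pts
  | fuel+1 =>
    let cands := pvHananAlt pts
    if cands.isEmpty then pts
    else
      let scored := cands.map (fun c => (pvRmstAlt (pts ++ [c]), c))
      match PySem.List.min? scored (fun t => t.1) with
      | none => pts
      | some mc => if cur ≤ mc.1 then pts else pvOuterAlt fuel (pts ++ [mc.2]) mc.1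

def i1s_basic_alt (terminals : List (Int × Int)) : List (Int × Int) :=
  pvOuterAlt ((pvRmstAlt terminals).toNat + 1) terminals (pvRmstAlt terminals)

-- ===== PRECONDITION & SPEC =====
def Spec_i1s_basic (terminals : List (Int × Int)) (out : List (Int × Int)) : Prop :=
  out = i1s_basic_alt terminals
instance (terminals : List (Int × Int)) (out : List (Int × Int)) : Decidable (Spec_i1s_basic terminals out) := by
  unfold Spec_i1s_basic; infer_instance

-- ===== CLAIM (what is proved, stated in full; the proofs are below) =====
def Claim_equal_i1s_basic : Prop :=
  ∀ (terminals : List (Int × Int)), Dom_i1s_basic terminals →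
    Spec_i1s_basic terminals (i1s_basic terminals)

-- ===== LEMMAS AND PROOFS =====

-- (range l.length).map over getD = map
theorem pv_map_range_getD {α β : Type} (l : List α) (F : α → β) (d : α) :
    (List.range l.length).map (fun i => F (l.getD i d)) = l.map F := by
  induction l with
  | nil => rfl
  | cons x xs ih =>
    simp only [List.length_cons, List.range_succ_eq_map, List.map_cons, List.map_map]
    refine congrArg₂ _ rfl ?_
    simpa [Function.comp] using ih

-- proof-side name for the fold step inside PySem.List.min? (specialised to key = snd)
def pvMinStep : Option ((Int × Int) × Int) → ((Int × Int) × Int) → Option ((Int × Int) × Int) :=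
  fun acc x =>
    match acc with
    | none => some x
    | some m => if x.2 < m.2 then some x else some m

theorem pvMinStep_none (x : (Int × Int) × Int) : pvMinStep none x = some x := rfl

theorem pvMinStep_some (m x : (Int × Int) × Int) :
    pvMinStep (some m) x = if x.2 < m.2 then some x else some m := rfl

theorem pv_min?_eq_foldl (l : List ((Int × Int) × Int)) :
    PySem.List.min? l (fun t => t.2) = l.foldl pvMinStep none := by
  unfold PySem.List.min?
  congr 1
  funext acc x
  cases acc <;> rfl

-- the simultaneous first-min correspondence between A's index scan and B's min? fold
theorem pv_corr (f : Nat → Int) (g : Nat → ((Int × Int) × Int)) (hg : ∀ v, (g v).2 = f v) :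
    ∀ (M : List Nat) (v : Nat),
      ∃ pre w suf, (v :: M) = pre ++ w :: suf ∧
        (∀ x ∈ pre, f w < f x) ∧ (∀ x ∈ suf, f w ≤ f x) ∧
        M.foldl (fun st u => if pvLtO (some (f u)) st.2 then (some u, some (f u)) else st)
            (some v, some (f v)) = (some w, some (f w)) ∧
        (M.map g).foldl pvMinStep (some (g v)) = some (g w) := by
  intro M
  induction M with
  | nil => exact fun v => ⟨[], v, [], rfl, by simp, by simp, rfl, rfl⟩
  | cons x xs ih =>
    intro v
    by_cases hlt : f x < f v
    · obtain ⟨pre, w, suf, hdec, hpre, hsuf, hA, hB⟩ := ih x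
      have hwx : f w ≤ f x := by
        cases pre with
        | nil =>
          simp only [List.nil_append] at hdec
          injection hdec with h1 _
          subst h1; exact le_refl _
        | cons a pre' =>
          simp only [List.cons_append] at hdec
          injection hdec with h1 _
          subst h1; exact le_of_lt (hpre x (by simp))
      refine ⟨v :: pre, w, suf, ?_, ?_, hsuf, ?_, ?_⟩
      · rw [List.cons_append, ← hdec]
      · intro y hy
        rcases List.mem_cons.mp hy with h | h
        · subst h; exact lt_of_le_of_lt hwx hlt
        · exact hpre y h
      · simpa [pvLtO, List.foldl_cons, hlt] using hA
      · rw [List.map_cons, List.foldl_cons, pvMinStep_some, hg, hg, if_pos hlt]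
        exact hB
    · obtain ⟨pre, w, suf, hdec, hpre, hsuf, hA, hB⟩ := ih v
      have hle : f v ≤ f x := le_of_not_gt hlt
      cases pre with
      | nil =>
        simp only [List.nil_append] at hdec
        injection hdec with h1 h2
        subst h1
        refine ⟨[], v, x :: xs, rfl, by simp, ?_, ?_, ?_⟩
        · intro y hy
          rcases List.mem_cons.mp hy with h | h
          · subst h; exact hle
          · exact hsuf y (h2 ▸ h)
        · simpa [pvLtO, List.foldl_cons, hlt] using hA
        · rw [List.map_cons, List.foldl_cons, pvMinStep_some, hg, hg, if_neg hlt]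
          exact hB
      | cons a pre' =>
        simp only [List.cons_append] at hdec
        injection hdec with h1 h2
        subst h1
        have hwv : f w < f v := hpre v (by simp)
        refine ⟨v :: x :: pre', w, suf, ?_, ?_, hsuf, ?_, ?_⟩
        · simp [h2]
        · intro y hy
          rcases List.mem_cons.mp hy with h | h
          · subst h; exact hwv
          · rcases List.mem_cons.mp h with h3 | h3
            · subst h3; exact lt_of_lt_of_le hwv hle
            · exact hpre y (by simp [h3])
        · simpa [pvLtO, List.foldl_cons, hlt] using hA
        · rw [List.map_cons, List.foldl_cons, pvMinStep_some, hg, hg, if_neg hlt]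
          exact hB

-- evaluating A's relaxation array at an index
theorem pv_relax_getD (pts : List (Int × Int)) (n : Nat) (intree : List Bool)
    (bd : List (Option Int)) (u v : Nat) (hv : v < n) :
    (pvRelaxA pts n intree bd u).getD v none =
      if intree.getD v true then bd.getD v none
      else
        let d : Int := |(pts.getD v (0,0)).1 - (pts.getD u (0,0)).1| +
                       |(pts.getD v (0,0)).2 - (pts.getD u (0,0)).2|
        if pvLtO (some d) (bd.getD v none) then some d else bd.getD v none := by
  unfold pvRelaxA
  simp [List.getD_eq_getElem?_getD, hv]

-- the main bridge: A's array Prim loop = B's worklist loop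
theorem pv_bridge (pts : List (Int × Int)) (n : Nat) :
    ∀ (k : Nat) (intree : List Bool) (bd : List (Option Int)) (total : Int),
      intree.length = n →
      ((List.range n).filter (fun v => !(intree.getD v true))).length = k →
      (∀ v ∈ (List.range n).filter (fun v => !(intree.getD v true)),
        ∃ d : Int, bd.getD v none = some d) →
      pvPrimLoopA pts n k intree bd total =
        pvAltLoop k
          (((List.range n).filter (fun v => !(intree.getD v true))).map
            (fun v => (pts.getD v (0,0), (bd.getD v none).getD 0))) total := by
  intro k
  induction k with
  | zero => intro intree bd total _ _ _; rfl
  | succ k ih =>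
    intro intree bd total hlenI hlenM hfin0
    set f : Nat → Int := fun v => (bd.getD v none).getD 0 with hf
    set g : Nat → ((Int × Int) × Int) := fun v => (pts.getD v (0,0), f v) with hgdef
    set M : List Nat := (List.range n).filter (fun v => !(intree.getD v true)) with hMdef
    have hfin : ∀ v ∈ M, bd.getD v none = some (f v) := by
      intro v hv
      obtain ⟨d, hd⟩ := hfin0 v hv
      show bd.getD v none = some ((bd.getD v none).getD 0)
      rw [hd]
      rfl
    obtain ⟨m0, Mt, hM⟩ : ∃ m0 Mt, M = m0 :: Mt := by
      cases hMc : M with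
      | nil => rw [hMc] at hlenM; simp at hlenM
      | cons a t => exact ⟨a, t, rfl⟩
    have hgsnd : ∀ v, (g v).2 = f v := fun v => rfl
    obtain ⟨pre, w, suf, hdec, hpre, hsuf, hA, hB⟩ := pv_corr f g hgsnd Mt m0
    have hMx : M = pre ++ w :: suf := by rw [hM, hdec]
    have hw_mem : w ∈ M := by rw [hMx]; exact List.mem_append_right _ (List.mem_cons_self)
    have hw_lt : w < n := by
      have h1 : w ∈ List.range n := List.mem_of_mem_filter (hMdef ▸ hw_mem)
      exact List.mem_range.mp h1
    have hwcond : intree.getD w true = false := by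
      have h1 := (List.mem_filter.mp (hMdef ▸ hw_mem)).2
      simpa using h1
    have hnd : M.Nodup := hMdef ▸ (List.nodup_range).filter _
    have hwpre : w ∉ pre := by
      rw [hMx] at hnd
      have := (List.nodup_middle.mp hnd)
      exact fun h => (List.nodup_cons.mp this).1 (List.mem_append_left _ h)
    have hwsuf : w ∉ suf := by
      rw [hMx] at hnd
      have := (List.nodup_middle.mp hnd)
      exact fun h => (List.nodup_cons.mp this).1 (List.mem_append_right _ h)
    -- A's scan returns (w, f w)
    have hscan : pvScanA intree bd n = (some w, some (f w)) := by
      unfold pvScanA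
      have h0 : (List.range n).foldl
          (fun st v =>
            if (!(intree.getD v true)) && pvLtO (bd.getD v none) st.2 then (some v, bd.getD v none) else st)
          (none, none) =
          M.foldl (fun st v => if pvLtO (bd.getD v none) st.2 then (some v, bd.getD v none) else st)
            (none, none) := by
        rw [hMdef, List.foldl_filter]
        apply PySem.List.foldl_congr_mem
        intro st v _
        cases intree.getD v true <;> simp
      rw [h0, hM, List.foldl_cons, hfin m0 (by rw [hM]; exact List.mem_cons_self)]
      have h1 : (if pvLtO (some (f m0)) ((none : Option Nat), (none : Option Int)).2 then
            ((some m0 : Option Nat), some (f m0))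
          else ((none : Option Nat), (none : Option Int))) = ((some m0 : Option Nat), some (f m0)) := rfl
      rw [h1]
      calc Mt.foldl (fun st v => if pvLtO (bd.getD v none) st.2 then (some v, bd.getD v none) else st)
            (some m0, some (f m0))
          = Mt.foldl (fun st v => if pvLtO (some (f v)) st.2 then (some v, some (f v)) else st)
            (some m0, some (f m0)) := by
            apply PySem.List.foldl_congr_mem
            intro st v hv
            rw [hfin v (by rw [hM]; exact List.mem_cons_of_mem _ hv)]
        _ = (some w, some (f w)) := hA
    -- B's min? returns g w
    have hmin : PySem.List.min? (M.map g) (fun t => t.2) = some (g w) := by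
      rw [pv_min?_eq_foldl, hM, List.map_cons, List.foldl_cons, pvMinStep_none]
      exact hB
    -- one step of A's loop
    have hAstep : pvPrimLoopA pts n (k+1) intree bd total
        = pvPrimLoopA pts n k (intree.set w true)
            (pvRelaxA pts n (intree.set w true) bd w) (total + f w) := by
      conv_lhs => rw [pvPrimLoopA]
      rw [hscan]
      rfl
    -- one step of B's loop
    have hgw_mem : g w ∈ M.map g := List.mem_map_of_mem hw_mem
    have hgwpre : g w ∉ pre.map g := by
      intro hmem
      obtain ⟨x, hx, hgx⟩ := List.mem_map.mp hmem
      have hlt : f w < f x := hpre x hx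
      have : f x = f w := by
        have := congrArg Prod.snd hgx
        simpa [hgdef] using this
      omega
    have hremove : (PySem.List.remove? (M.map g) (g w)).getD [] = (pre ++ suf).map g := by
      rw [PySem.List.remove?_eq_some_erase _ _ hgw_mem, Option.getD_some, hMx, List.map_append,
        List.map_cons, List.erase_append_right _ hgwpre, List.erase_cons_head, ← List.map_append]
    have hBstep : pvAltLoop (k+1) (M.map g) total
        = pvAltLoop k (((pre ++ suf).map g).map (fun t => (t.1, min t.2 (pvMan t.1 (g w).1))))
            (total + f w) := by
      conv_lhs => rw [pvAltLoop]
      rw [hM, List.map_cons]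
      have hne : ((g m0 :: Mt.map g).isEmpty) = false := rfl
      rw [hne]
      simp only [Bool.false_eq_true, if_false]
      rw [← List.map_cons, ← hM, hmin]
      show pvAltLoop k
          (((PySem.List.remove? (M.map g) (g w)).getD []).map (fun t => (t.1, min t.2 (pvMan t.1 (g w).1))))
          (total + (g w).2) = _
      rw [hremove]
    -- the new intree
    have hset : ∀ v : Nat, (intree.set w true).getD v true = if w = v then true else intree.getD v true := by
      intro v
      by_cases hv : w = v
      · subst hv
        simp [List.getD_eq_getElem?_getD, hlenI, hw_lt]
      · simp [List.getD_eq_getElem?_getD, hv]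
    have hM' : (List.range n).filter (fun v => !((intree.set w true).getD v true)) = pre ++ suf := by
      have h1 : (List.range n).filter (fun v => !((intree.set w true).getD v true))
          = (List.range n).filter (fun v => (!(v == w)) && (!(intree.getD v true))) := by
        apply List.filter_congr
        intro v _
        by_cases hvw : w = v
        · subst hvw; rw [hset]; simp
        · have hvw' : ¬ (v = w) := fun h => hvw h.symm
          rw [hset]; simp [hvw, hvw']
      rw [h1, ← List.filter_filter, ← hMdef, hMx, List.filter_append, List.filter_cons]
      have hpre' : pre.filter (fun v => !(v == w)) = pre :=
        List.filter_eq_self.mpr (fun x hx => by simp; exact fun h => hwpre (h ▸ hx))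
      have hsuf' : suf.filter (fun v => !(v == w)) = suf :=
        List.filter_eq_self.mpr (fun x hx => by simp; exact fun h => hwsuf (h ▸ hx))
      simp [hpre', hsuf']
    -- facts about elements of pre ++ suf
    have hmem' : ∀ v ∈ pre ++ suf, v ∈ M ∧ v ≠ w ∧ v < n ∧ intree.getD v true = false := by
      intro v hv
      have hvM : v ∈ M := by
        rw [hMx]
        rcases List.mem_append.mp hv with h | h
        · exact List.mem_append_left _ h
        · exact List.mem_append_right _ (List.mem_cons_of_mem _ h)
      have hvw : v ≠ w := by
        rcases List.mem_append.mp hv with h | h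
        · exact fun he => hwpre (he ▸ h)
        · exact fun he => hwsuf (he ▸ h)
      have hvn : v < n := List.mem_range.mp (List.mem_of_mem_filter (hMdef ▸ hvM))
      have hvc : intree.getD v true = false := by
        have h1 := (List.mem_filter.mp (hMdef ▸ hvM)).2
        simpa using h1
      exact ⟨hvM, hvw, hvn, hvc⟩
    -- value of the relaxed array on remaining indices
    have hbd' : ∀ v ∈ pre ++ suf,
        (pvRelaxA pts n (intree.set w true) bd w).getD v none =
          some (min (f v) (|(pts.getD v (0,0)).1 - (pts.getD w (0,0)).1| +
                           |(pts.getD v (0,0)).2 - (pts.getD w (0,0)).2|)) := by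
      intro v hv
      obtain ⟨hvM, hvw, hvn, hvc⟩ := hmem' v hv
      rw [pv_relax_getD pts n _ bd w v hvn]
      have hoff : (intree.set w true).getD v true = false := by
        rw [hset, if_neg (fun h => hvw h.symm), hvc]
      rw [hoff]
      simp only [Bool.false_eq_true, if_false]
      rw [hfin v hvM]
      set d : Int := |(pts.getD v (0,0)).1 - (pts.getD w (0,0)).1| +
                     |(pts.getD v (0,0)).2 - (pts.getD w (0,0)).2| with hd
      by_cases hlt : d < f v
      · have : pvLtO (some d) (some (f v)) = true := by simp [pvLtO, hlt]
        rw [this]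
        simp only [if_true]
        congr 1
        omega
      · have : pvLtO (some d) (some (f v)) = false := by simp [pvLtO, hlt]
        rw [this]
        simp only [Bool.false_eq_true, if_false]
        congr 1
        omega
    -- apply the induction hypothesis
    have hlen' : ((List.range n).filter (fun v => !((intree.set w true).getD v true))).length = k := by
      rw [hM']
      have : M.length = k + 1 := hlenM
      rw [hMx] at this
      simp at this ⊢
      omega
    have hfin' : ∀ v ∈ (List.range n).filter (fun v => !((intree.set w true).getD v true)),
        ∃ d : Int, (pvRelaxA pts n (intree.set w true) bd w).getD v none = some d := by
      rw [hM']
      intro v hv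
      exact ⟨_, hbd' v hv⟩
    have hih := ih (intree.set w true) (pvRelaxA pts n (intree.set w true) bd w) (total + f w)
      (by rw [List.length_set, hlenI]) hlen' hfin'
    rw [hM'] at hih
    rw [hAstep, hBstep, hih]
    congr 1
    rw [List.map_map]
    apply List.map_congr_left
    intro v hv
    have hval := hbd' v hv
    simp only [Function.comp]
    rw [hval]
    rfl

theorem pv_rmst_eq (pts : List (Int × Int)) : pvRmstA pts = pvRmstAlt pts := by
  cases pts with
  | nil => rfl
  | cons p0 rest =>
    by_cases hlen : (p0 :: rest).length ≤ 1
    · unfold pvRmstA pvRmstAlt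
      rw [if_pos hlen, if_pos hlen]
    · unfold pvRmstA pvRmstAlt
      rw [if_neg hlen, if_neg hlen]
      simp only [List.length_cons, List.tail_cons, List.headD_cons, Nat.add_sub_cancel]
      set m := rest.length with hm
      have hbdnone : ∀ i : Nat, (List.replicate m (none : Option Int)).getD i none = none := by
        intro i
        rw [List.getD_eq_getElem?_getD, List.getElem?_replicate]
        split <;> rfl
      have hrepfalse : ∀ i : Nat, i < m + 1 → (List.replicate (m+1) false).getD i true = false := by
        intro i hi
        rw [List.getD_eq_getElem?_getD, List.getElem?_replicate, if_pos hi]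
        rfl
      have hconst : ∀ (l : List Nat) (st : Option Nat × Option Int),
          l.foldl (fun st (_ : Nat) => st) st = st := by
        intro l
        induction l with
        | nil => intro st; rfl
        | cons a t ih => intro st; simp only [List.foldl_cons]; exact ih st
      have hscan0 : pvScanA (List.replicate (m+1) false) (some 0 :: List.replicate m none) (m+1)
          = (some 0, some 0) := by
        unfold pvScanA
        rw [List.range_succ_eq_map, List.foldl_cons]
        have h0 : (if ((!(List.replicate (m+1) false).getD 0 true) &&
              pvLtO ((some 0 :: List.replicate m (none : Option Int)).getD 0 none)
                ((none : Option Nat), (none : Option Int)).2) = true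
            then ((some 0 : Option Nat), (some 0 :: List.replicate m (none : Option Int)).getD 0 none)
            else ((none : Option Nat), (none : Option Int))) = (some 0, some 0) := by
          rw [hrepfalse 0 (by omega)]
          rfl
        rw [h0, List.foldl_map]
        have hstep : ∀ (st : Option Nat × Option Int) (i : Nat), i ∈ List.range m →
            (if ((!(List.replicate (m+1) false).getD (Nat.succ i) true) &&
                pvLtO ((some 0 :: List.replicate m (none : Option Int)).getD (Nat.succ i) none) st.2) = true
            then (some (Nat.succ i), (some 0 :: List.replicate m (none : Option Int)).getD (Nat.succ i) none)
            else st) = st := by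
          intro st i _
          have h1 : (some 0 :: List.replicate m (none : Option Int)).getD (Nat.succ i) none = none := by
            rw [List.getD_cons_succ, hbdnone]
          rw [h1]
          simp [pvLtO]
        exact Eq.trans (PySem.List.foldl_congr_mem _ _ _ _ (fun st i hi => hstep st i hi)) (hconst _ _)
      have hintree1 : (List.replicate (m+1) false).set 0 true = true :: List.replicate m false := by
        rw [List.replicate_succ]
        rfl
      have hrelax1 : ∀ i : Nat, i < m →
          (pvRelaxA (p0 :: rest) (m+1) (true :: List.replicate m false)
            (some 0 :: List.replicate m none) 0).getD (i+1) none
          = some (pvMan (rest.getD i (0,0)) p0) := by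
        intro i hi
        rw [pv_relax_getD _ _ _ _ _ _ (by omega)]
        have h1 : (true :: List.replicate m false).getD (i+1) true = false := by
          rw [List.getD_cons_succ, List.getD_eq_getElem?_getD, List.getElem?_replicate, if_pos hi]
          rfl
        rw [h1]
        simp only [Bool.false_eq_true, if_false]
        simp only [List.getD_cons_succ, List.getD_cons_zero]
        rw [hbdnone i]
        rfl
      have hM1 : (List.range (m+1)).filter (fun v => !((true :: List.replicate m false).getD v true))
          = (List.range m).map Nat.succ := by
        rw [List.range_succ_eq_map, List.filter_cons]
        simp only [List.getD_cons_zero, Bool.not_true, Bool.false_eq_true, if_false]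
        rw [List.filter_map]
        have hall : ∀ x ∈ List.range m,
            ((fun v => !((true :: List.replicate m false).getD v true)) ∘ Nat.succ) x = true := by
          intro i hi
          have hi' := List.mem_range.mp hi
          simp only [Function.comp]
          rw [List.getD_cons_succ, List.getD_eq_getElem?_getD, List.getElem?_replicate, if_pos hi']
          rfl
        rw [List.filter_eq_self.mpr hall]
      have hA1 : pvPrimLoopA (p0 :: rest) (m+1) (m+1) (List.replicate (m+1) false)
            (some 0 :: List.replicate m none) 0
          = pvPrimLoopA (p0 :: rest) (m+1) m (true :: List.replicate m false)
              (pvRelaxA (p0 :: rest) (m+1) (true :: List.replicate m false)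
                (some 0 :: List.replicate m none) 0) 0 := by
        conv_lhs => rw [pvPrimLoopA]
        rw [hscan0]
        show pvPrimLoopA (p0 :: rest) (m+1) m ((List.replicate (m+1) false).set 0 true)
            (pvRelaxA (p0 :: rest) (m+1) ((List.replicate (m+1) false).set 0 true)
              (some 0 :: List.replicate m none) 0) (0 + (some (0:Int)).getD 0) = _
        rw [hintree1]
        norm_num
      have hfin1 : ∀ v ∈ (List.range (m+1)).filter
            (fun v => !((true :: List.replicate m false).getD v true)), ∃ d : Int,
          (pvRelaxA (p0 :: rest) (m+1) (true :: List.replicate m false)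
            (some 0 :: List.replicate m none) 0).getD v none = some d := by
        rw [hM1]
        intro v hv
        obtain ⟨i, hi, rfl⟩ := List.mem_map.mp hv
        exact ⟨_, hrelax1 i (List.mem_range.mp hi)⟩
      have hbridge := pv_bridge (p0 :: rest) (m+1) m (true :: List.replicate m false)
        (pvRelaxA (p0 :: rest) (m+1) (true :: List.replicate m false)
          (some 0 :: List.replicate m none) 0) 0
        (by simp) (by rw [hM1]; simp) hfin1
      rw [hM1] at hbridge
      rw [hA1, hbridge]
      congr 1
      rw [List.map_map, ← pv_map_range_getD rest (fun p => (p, pvMan p p0)) (0,0)]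
      apply List.map_congr_left
      intro i hi
      have hi' := List.mem_range.mp hi
      simp only [Function.comp]
      rw [List.getD_cons_succ]
      show ((rest.getD i (0,0)), ((pvRelaxA (p0 :: rest) (m+1) (true :: List.replicate m false)
          (some 0 :: List.replicate m none) 0).getD (i+1) none).getD 0) = _
      rw [hrelax1 i hi']
      rfl

theorem pv_hanan_eq (pts : List (Int × Int)) : pvHananA pts = pvHananAlt pts := by
  unfold pvHananA pvHananAlt
  have hinner : ∀ (x : Int) (ys : List Int) (acc : List (Int × Int)),
      ys.foldl (fun acc2 y => if (x, y) ∈ pts then acc2 else acc2 ++ [(x, y)]) acc =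
      acc ++ (ys.filter (fun y => !(decide ((x, y) ∈ pts)))).map (fun y => (x, y)) := by
    intro x ys acc
    rw [← PySem.List.foldl_append_if (fun y => !(decide ((x, y) ∈ pts))) (fun y => (x, y))]
    apply PySem.List.foldl_congr_mem
    intro acc2 y _
    by_cases h : (x, y) ∈ pts <;> simp [h]
  calc _ = (PySem.List.sorted (PySem.Set.ofList (pts.map Prod.fst)) (fun x => x) false).foldl
        (fun acc x => acc ++ ((PySem.List.sorted (PySem.Set.ofList (pts.map Prod.snd)) (fun x => x) false).filter
          (fun y => !(decide ((x, y) ∈ pts)))).map (fun y => (x, y))) [] := by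
        apply PySem.List.foldl_congr_mem; intro acc x _; exact hinner x _ acc
    _ = _ := by rw [PySem.List.foldl_append_eq_flatMap]; simp

-- relation between A's running (best_gain, best_c) pair and B's running minimum of scored
def pvSelRel (cur : Int) (st : Int × Option (Int × Int)) (mo : Option (Int × (Int × Int))) : Prop :=
  match mo with
  | none => st = (0, none)
  | some m => (m.1 < cur → st = (cur - m.1, some m.2)) ∧ (cur ≤ m.1 → st = (0, none))

theorem pv_sel (cur : Int) (L : (Int × Int) → Int) :
    ∀ (cands : List (Int × Int)) (st : Int × Option (Int × Int)) (mo : Option (Int × (Int × Int))),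
      pvSelRel cur st mo →
      pvSelRel cur
        (cands.foldl (fun st c =>
          let gain := cur - L c
          if st.1 < gain then (gain, some c) else st) st)
        ((cands.map (fun c => (L c, c))).foldl (fun acc x =>
          match acc with
          | none => some x
          | some m => if x.1 < m.1 then some x else some m) mo) := by
  intro cands
  induction cands with
  | nil => intro st mo h; exact h
  | cons c cs ih =>
    intro st mo h
    simp only [List.map_cons, List.foldl_cons]
    apply ih
    cases mo with
    | none =>
      have hst : st = (0, none) := h
      subst hst
      show pvSelRel cur _ (some (L c, c))
      constructor
      · intro hc
        have hc' : L c < cur := hc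
        split
        next => rfl
        next hcond =>
          have hcond' : ¬ ((0:Int) < cur - L c) := hcond
          exact absurd hc' (by omega)
      · intro hc
        have hc' : cur ≤ L c := hc
        split
        next hcond =>
          have hcond' : (0:Int) < cur - L c := hcond
          exact absurd hcond' (by omega)
        next => rfl
    | some m =>
      obtain ⟨h1, h2⟩ := h
      show pvSelRel cur _ (if L c < m.1 then some (L c, c) else some m)
      by_cases hcm : L c < m.1
      · rw [if_pos hcm]
        by_cases hm : m.1 < cur
        · rw [h1 hm]
          constructor
          · intro hc
            split
            next => rfl
            next hcond =>
              have hcond' : ¬ (cur - m.1 < cur - L c) := hcond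
              exact absurd hcm (by omega)
          · intro hc
            have hc' : cur ≤ L c := hc
            exact absurd hc' (by omega)
        · rw [h2 (le_of_not_gt hm)]
          have hm' : cur ≤ m.1 := le_of_not_gt hm
          constructor
          · intro hc
            have hc' : L c < cur := hc
            split
            next => rfl
            next hcond =>
              have hcond' : ¬ ((0:Int) < cur - L c) := hcond
              exact absurd hc' (by omega)
          · intro hc
            have hc' : cur ≤ L c := hc
            split
            next hcond =>
              have hcond' : (0:Int) < cur - L c := hcond
              exact absurd hcond' (by omega)
            next => rfl
      · rw [if_neg hcm]
        have hge : m.1 ≤ L c := le_of_not_gt hcm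
        constructor
        · intro hm
          rw [h1 hm]
          split
          next hcond =>
            have hcond' : cur - m.1 < cur - L c := hcond
            exact absurd hcond' (by omega)
          next => rfl
        · intro hm
          rw [h2 hm]
          split
          next hcond =>
            have hcond' : (0:Int) < cur - L c := hcond
            exact absurd hcond' (by omega)
          next => rfl

theorem pv_outer_eq : ∀ (fuel : Nat) (pts : List (Int × Int)) (cur : Int),
    pvOuterA fuel pts cur = pvOuterAlt fuel pts cur := by
  intro fuel
  induction fuel with
  | zero => intro pts cur; rfl
  | succ fuel ih =>
    intro pts cur
    unfold pvOuterA pvOuterAlt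
    simp only [pv_hanan_eq, pv_rmst_eq]
    by_cases hc : (pvHananAlt pts).isEmpty
    · simp [hc]
    · simp only [hc, if_neg, Bool.false_eq_true, not_false_eq_true]
      have hrel := pv_sel cur (fun c => pvRmstAlt (pts ++ [c])) (pvHananAlt pts) (0, none) none rfl
      have hmin : PySem.List.min? ((pvHananAlt pts).map (fun c => (pvRmstAlt (pts ++ [c]), c)))
          (fun t => t.1) =
          ((pvHananAlt pts).map (fun c => (pvRmstAlt (pts ++ [c]), c))).foldl (fun acc x =>
            match acc with
            | none => some x
            | some m => if x.1 < m.1 then some x else some m) none := by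
        unfold PySem.List.min?
        congr 1
        funext acc x
        cases acc <;> rfl
      rw [hmin]
      cases hmo : ((pvHananAlt pts).map (fun c => (pvRmstAlt (pts ++ [c]), c))).foldl (fun acc x =>
            match acc with
            | none => some x
            | some m => if x.1 < m.1 then some x else some m) none with
      | none =>
        exfalso
        have := (PySem.List.min?_eq_none_iff
            ((pvHananAlt pts).map (fun c => (pvRmstAlt (pts ++ [c]), c))) (fun t => t.1)).mp
          (by rw [hmin]; exact hmo)
        simp [List.map_eq_nil_iff] at this
        rw [this] at hc
        simp at hc
      | some m =>
        rw [hmo] at hrel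
        obtain ⟨h1, h2⟩ := hrel
        by_cases hm : m.1 < cur
        · rw [h1 hm]
          have hcur : cur - (cur - m.1) = m.1 := by omega
          simp only [hcur, if_neg (not_le.mpr hm)]
          exact ih (pts ++ [m.2]) m.1
        · rw [h2 (le_of_not_gt hm)]
          simp [le_of_not_gt hm]

-- ===== VERDICT (by name: the statement is the Claim_ definition above) =====
theorem i1s_basic_spec : Claim_equal_i1s_basic := by
  intro terminals _
  unfold Spec_i1s_basic i1s_basic i1s_basic_alt
  rw [pv_rmst_eq, pv_outer_eq]
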